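-- pv_equiv track=rewrite | github.com/MFCo/advent-of-code | 2024/day-9/part1.py | move_things_left
-- ===== SOURCE A (Python) =====
-- def move_things_left(blocks):
--     right_file = len(blocks) - 1
--     while True:
--         while right_file >= 0 and blocks[right_file] is None:
--             right_file -= 1
--         if right_file < 0:
--             break
--         left_space = 0
--         while left_space < len(blocks) and blocks[left_space] is not None:
--             left_space += 1
--         if left_space >= right_file:
--             break
--         blocks[left_space] = blocks[right_file]
--         blocks[right_file] = None
--     return blocks
-- ===== SOURCE B (Python) =====
-- def move_things_left(blocks):
--     # O(n) closed-form compaction: count the files (n), collect the files sitting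
--     # past position n, and drop them right-to-left into the gaps of the first n
--     # slots; the tail becomes all-None padding. Mutates blocks in place (slice
--     # assignment) like the original; equivalence is about the return value.
--     n = sum(x is not None for x in blocks)
--     movers = [x for x in blocks[n:] if x is not None]
--     out = []
--     for x in blocks[:n]:
--         if x is None and movers:
--             out.append(movers.pop())
--         else:
--             out.append(x)
--     blocks[:] = out + [None] * (len(blocks) - n)
--     return blocks
-- ===== Notes on version B (the rewrite author's own statement) =====
-- stated objective: faster
-- what changed: Replaces the repeated full rescans for the leftmost gap / rightmost file (one pair of O(n) scans per moved block) by a single closed-form pass: count the files n, gather the files beyond position n, and fill the gaps of the first n slots from that list right-to-left.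
import Mathlib
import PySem

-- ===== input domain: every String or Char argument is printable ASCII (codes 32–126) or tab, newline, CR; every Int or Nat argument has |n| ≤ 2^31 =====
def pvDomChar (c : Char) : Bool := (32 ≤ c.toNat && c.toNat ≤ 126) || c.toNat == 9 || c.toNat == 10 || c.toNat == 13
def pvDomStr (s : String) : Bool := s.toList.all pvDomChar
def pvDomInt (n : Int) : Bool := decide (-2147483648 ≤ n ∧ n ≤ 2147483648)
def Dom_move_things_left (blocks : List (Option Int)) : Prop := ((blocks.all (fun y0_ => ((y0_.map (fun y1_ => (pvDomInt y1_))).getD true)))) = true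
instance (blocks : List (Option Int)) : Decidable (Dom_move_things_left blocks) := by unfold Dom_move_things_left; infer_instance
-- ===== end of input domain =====

-- B replaces A's quadratic rescan-and-swap loop by a single counting pass (count files n,
-- fill the gaps of the first n slots from the files past position n, right-to-left): O(n) vs O(n^2).
-- Python A mutates its argument in place (B does too, via slice assignment); the equivalence proved
-- here is about the return value.

-- ===== PORT A =====
-- Each while loop is ported as a structural recursion on a Nat fuel that equals the number of
-- iterations the Python loop can still make, so the loop's own stopping test always fires
-- before the fuel runs out; the fuel-0 value is the value the stopped loop would return there.

-- inner loop 'while right_file >= 0 and blocks[right_file] is None: right_file -= 1'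
def findRightAux (blocks : List (Option Int)) : Nat → Int → Int
  | 0, i => i
  | fuel + 1, i =>
    if 0 ≤ i ∧ PySem.List.pyGet? blocks i = some none then findRightAux blocks fuel (i - 1)
    else i

def findRight (blocks : List (Option Int)) (i : Int) : Int :=
  findRightAux blocks (i + 1).toNat i

-- inner loop 'while left_space < len(blocks) and blocks[left_space] is not None: left_space += 1'
def findLeftAux (blocks : List (Option Int)) : Nat → Int → Int
  | 0, i => i
  | fuel + 1, i =>
    if i < (blocks.length : Int) ∧ ¬ PySem.List.pyGet? blocks i = some none then
      findLeftAux blocks fuel (i + 1)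
    else i

def findLeft (blocks : List (Option Int)) (i : Int) : Int :=
  findLeftAux blocks ((blocks.length : Int) - i).toNat i

-- outer 'while True' loop; the state is (blocks, right_file).  After the swap, blocks[r] is None,
-- so the next iteration's inner right scan immediately steps from r to r - 1: we pass r - 1,
-- which performs that same first scan step.  Fuel 0 means right_file < 0: the loop breaks and
-- returns blocks.
def goA : Nat → List (Option Int) → Int → List (Option Int)
  | 0, blocks, _ => blocks
  | fuel + 1, blocks, rf =>
    let r := findRight blocks rf
    if r < 0 then blocks
    else
      let l := findLeft blocks 0
      if l ≥ r then blocks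
      else
        -- blocks[left_space] = blocks[right_file]; blocks[right_file] = None
        -- (0 ≤ l < r here, so .toNat is exact)
        goA fuel ((blocks.set l.toNat ((PySem.List.pyGet? blocks r).getD none)).set r.toNat none)
          (r - 1)

def move_things_left (blocks : List (Option Int)) : List (Option Int) :=
  goA blocks.length blocks ((blocks.length : Int) - 1)

-- ===== PORT B =====
-- the 'for x in blocks[:n]' loop of Source B, state = (remaining prefix, movers, out);
-- 'movers.pop()' on the guarded non-empty list is getLast / dropLast
def fillLoop : List (Option Int) → List (Option Int) → List (Option Int) → List (Option Int)
  | [], _, out => out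
  | x :: rest, movers, out =>
    match x, movers with
    | none, m :: ms =>
        fillLoop rest ((m :: ms).dropLast) (out ++ [ms.getLastD m])
    | x, movers => fillLoop rest movers (out ++ [x])

def move_things_left_alt (blocks : List (Option Int)) : List (Option Int) :=
  -- n = sum(x is not None for x in blocks)
  let n : Int := blocks.foldl (fun acc x => if x.isSome then acc + 1 else acc) 0
  -- movers = [x for x in blocks[n:] if x is not None]
  let movers := (PySem.List.slice blocks (some n) none).filter (fun x => x.isSome)
  let out := fillLoop (PySem.List.slice blocks none (some n)) movers []
  -- blocks[:] = out + [None] * (len(blocks) - n)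
  out ++ PySem.List.pyRepeat [none] ((blocks.length : Int) - n)

-- ===== PRECONDITION & SPEC =====
def Spec_move_things_left (blocks : List (Option Int)) (out : List (Option Int)) : Prop := out = move_things_left_alt blocks
instance (blocks : List (Option Int)) (out : List (Option Int)) : Decidable (Spec_move_things_left blocks out) := by unfold Spec_move_things_left; infer_instance

-- ===== CLAIM (what is proved, stated in full; the proofs are below) =====
def Claim_equal_move_things_left : Prop := ∀ (blocks : List (Option Int)), Dom_move_things_left blocks → Spec_move_things_left blocks (move_things_left blocks)

-- ===== LEMMAS AND PROOFS =====

-- proof-side closed form of move_things_left_alt (Nat-indexed take/drop instead of slices)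
def cntSome (bs : List (Option Int)) : Nat := bs.countP (fun x => x.isSome)

def altSpec (bs : List (Option Int)) : List (Option Int) :=
  fillLoop (bs.take (cntSome bs)) ((bs.drop (cntSome bs)).filter (fun x => x.isSome)) []
    ++ List.replicate (bs.length - cntSome bs) none

theorem alt_eq_spec (bs : List (Option Int)) : move_things_left_alt bs = altSpec bs := by
  have hle : cntSome bs ≤ bs.length := List.countP_le_length
  have hfold : bs.foldl (fun acc x => if x.isSome then acc + 1 else acc) (0 : Int)
      = (cntSome bs : Int) := by
    rw [PySem.List.foldl_if_add_one]; simp [cntSome]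
  have hcast : (bs.length : Int) - (cntSome bs : Int) = ((bs.length - cntSome bs : Nat) : Int) := by
    omega
  simp only [move_things_left_alt, altSpec]
  rw [hfold, PySem.List.slice_from_natCast, PySem.List.slice_to_natCast, hcast,
    PySem.List.pyRepeat_singleton]
  simp

theorem fillLoop_all_some (P : List (Option Int)) (hP : ∀ y ∈ P, y.isSome = true) :
    ∀ (rest movers out : List (Option Int)),
      fillLoop (P ++ rest) movers out = fillLoop rest movers (out ++ P) := by
  induction P with
  | nil => intro rest movers out; simp
  | cons y P ih =>
    intro rest movers out
    obtain ⟨v, rfl⟩ := Option.isSome_iff_exists.mp (hP y (by simp))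
    rw [List.cons_append]
    have hstep : fillLoop (some v :: (P ++ rest)) movers out
        = fillLoop (P ++ rest) movers (out ++ [some v]) := by
      simp [fillLoop]
    rw [hstep, ih (fun y h => hP y (by simp [h])) rest movers (out ++ [some v])]
    simp

theorem fillLoop_gap (rest W out : List (Option Int)) (w : Option Int) :
    fillLoop (none :: rest) (W ++ [w]) out = fillLoop rest W (out ++ [w]) := by
  cases W with
  | nil => simp [fillLoop]
  | cons m ms =>
    rw [List.cons_append]
    simp only [fillLoop]
    rw [← List.cons_append, List.dropLast_concat]
    rw [List.getLastD_concat]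

theorem spec_sorted (P S : List (Option Int))
    (hP : ∀ y ∈ P, y.isSome = true) (hS : ∀ y ∈ S, y = none) :
    altSpec (P ++ S) = P ++ S := by
  have hcP : P.countP (fun x => x.isSome) = P.length := List.countP_eq_length.mpr hP
  have hcS : S.countP (fun x => x.isSome) = 0 :=
    List.countP_eq_zero.mpr (fun y hy => by simp [hS y hy])
  have hcnt : cntSome (P ++ S) = P.length := by
    unfold cntSome; rw [List.countP_append, hcP, hcS]; omega
  have hfS : S.filter (fun x => x.isSome) = [] :=
    List.filter_eq_nil_iff.mpr (fun y hy => by simp [hS y hy])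
  unfold altSpec
  rw [hcnt, List.take_left, List.drop_left, hfS]
  have hfill : fillLoop (P ++ []) [] [] = fillLoop [] [] ([] ++ P) :=
    fillLoop_all_some P hP [] [] []
  simp only [List.append_nil, List.nil_append] at hfill
  rw [hfill]
  have hrep : S = List.replicate S.length (none : Option Int) := List.eq_replicate_of_mem hS
  simp [fillLoop, ← hrep]

theorem take_chunk (P M S : List (Option Int)) (x y : Option Int) (c : Nat) (hc : c ≤ M.length) :
    (P ++ x :: M ++ y :: S).take (P.length + 1 + c) = P ++ x :: M.take c := by
  rw [List.take_append_of_le_length (by simp; omega), List.take_append,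
    List.take_of_length_le (by omega),
    show P.length + 1 + c - P.length = c + 1 by omega, List.take_succ_cons]

theorem drop_chunk (P M S : List (Option Int)) (x y : Option Int) (c : Nat) (hc : c ≤ M.length) :
    (P ++ x :: M ++ y :: S).drop (P.length + 1 + c) = M.drop c ++ y :: S := by
  rw [List.drop_append, List.drop_append,
    List.drop_eq_nil_of_le (le_refl P.length |>.trans (by omega)),
    show P.length + 1 + c - P.length = c + 1 by omega, List.drop_succ_cons,
    show P.length + 1 + c - (P ++ x :: M).length = 0 by simp; omega, List.drop_zero]
  simp

theorem spec_move (P M S : List (Option Int)) (v : Int)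
    (hP : ∀ y ∈ P, y.isSome = true) (hS : ∀ y ∈ S, y = none) :
    altSpec (P ++ some v :: M ++ none :: S) = altSpec (P ++ none :: M ++ some v :: S) := by
  have hcP : P.countP (fun x => x.isSome) = P.length := List.countP_eq_length.mpr hP
  have hcS : S.countP (fun x => x.isSome) = 0 :=
    List.countP_eq_zero.mpr (fun y hy => by simp [hS y hy])
  have hfS : S.filter (fun x => x.isSome) = [] :=
    List.filter_eq_nil_iff.mpr (fun y hy => by simp [hS y hy])
  have hcM : M.countP (fun x => x.isSome) ≤ M.length := List.countP_le_length
  have hn1 : cntSome (P ++ some v :: M ++ none :: S)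
      = P.length + 1 + M.countP (fun x => x.isSome) := by
    unfold cntSome
    simp [List.countP_append, hcP, hcS]
    omega
  have hn2 : cntSome (P ++ none :: M ++ some v :: S)
      = P.length + 1 + M.countP (fun x => x.isSome) := by
    unfold cntSome
    simp [List.countP_append, hcP, hcS]
    omega
  unfold altSpec
  rw [hn1, hn2, take_chunk _ _ _ _ _ _ hcM, take_chunk _ _ _ _ _ _ hcM,
    drop_chunk _ _ _ _ _ _ hcM, drop_chunk _ _ _ _ _ _ hcM]
  have hmov1 : (M.drop (M.countP (fun x => x.isSome)) ++ (none : Option Int) :: S).filter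
      (fun x => x.isSome) = (M.drop (M.countP (fun x => x.isSome))).filter (fun x => x.isSome) := by
    simp [hfS]
  have hmov2 : (M.drop (M.countP (fun x => x.isSome)) ++ some v :: S).filter
      (fun x => x.isSome)
      = (M.drop (M.countP (fun x => x.isSome))).filter (fun x => x.isSome) ++ [some v] := by
    simp [hfS]
  congr 1
  · -- the filled prefixes agree
    rw [hmov1, hmov2]
    have hfill1 := fillLoop_all_some P hP (some v :: M.take (M.countP (fun x => x.isSome)))
      ((M.drop (M.countP (fun x => x.isSome))).filter (fun x => x.isSome)) []
    have hfill2 := fillLoop_all_some P hP (none :: M.take (M.countP (fun x => x.isSome)))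
      ((M.drop (M.countP (fun x => x.isSome))).filter (fun x => x.isSome) ++ [some v]) []
    rw [hfill1, hfill2, fillLoop_gap]
    simp [fillLoop]
  · simp

theorem findRightAux_le (bs : List (Option Int)) :
    ∀ (n : Nat) (i : Int), findRightAux bs n i ≤ i := by
  intro n
  induction n with
  | zero => intro i; simp [findRightAux]
  | succ n ih =>
    intro i
    rw [findRightAux]
    split
    · have := ih (i - 1); omega
    · omega

theorem findRight_le (bs : List (Option Int)) (i : Int) : findRight bs i ≤ i :=
  findRightAux_le bs (i + 1).toNat i

theorem findRightAux_none (bs : List (Option Int)) :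
    ∀ (n : Nat) (i : Int) (j : Nat) (hj : j < bs.length),
      findRightAux bs n i < (j : Int) → (j : Int) ≤ i → bs[j] = none := by
  intro n
  induction n with
  | zero => intro i j hj h1 h2; simp [findRightAux] at h1; omega
  | succ n ih =>
    intro i j hj h1 h2
    rw [findRightAux] at h1
    split at h1
    · rename_i h
      by_cases hji : (j : Int) ≤ i - 1
      · exact ih (i - 1) j hj h1 hji
      · have hji' : (j : Int) = i := by omega
        have hg := h.2
        rw [← hji', PySem.List.pyGet?_natCast] at hg
        simpa [List.getElem?_eq_getElem hj] using hg
    · omega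

theorem findRight_none (bs : List (Option Int)) (i : Int) :
    ∀ (j : Nat) (hj : j < bs.length), findRight bs i < (j : Int) → (j : Int) ≤ i → bs[j] = none :=
  findRightAux_none bs (i + 1).toNat i

theorem findRightAux_stop (bs : List (Option Int)) :
    ∀ (n : Nat) (i : Int), (i + 1).toNat ≤ n → 0 ≤ findRightAux bs n i →
      ¬ PySem.List.pyGet? bs (findRightAux bs n i) = some none := by
  intro n
  induction n with
  | zero => intro i hn h; simp [findRightAux] at h ⊢; omega
  | succ n ih =>
    intro i hn h
    rw [findRightAux] at h ⊢
    split at h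
    · rename_i hc
      rw [if_pos hc] at ⊢
      exact ih (i - 1) (by omega) h
    · rename_i hc
      rw [if_neg hc] at ⊢
      intro hg
      exact hc ⟨h, hg⟩

theorem findRight_stop (bs : List (Option Int)) (i : Int) (h : 0 ≤ findRight bs i) :
    ¬ PySem.List.pyGet? bs (findRight bs i) = some none :=
  findRightAux_stop bs (i + 1).toNat i (le_refl _) h

theorem findLeftAux_ge (bs : List (Option Int)) :
    ∀ (n : Nat) (i : Int), i ≤ findLeftAux bs n i := by
  intro n
  induction n with
  | zero => intro i; simp [findLeftAux]
  | succ n ih =>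
    intro i
    rw [findLeftAux]
    split
    · have := ih (i + 1); omega
    · omega

theorem findLeft_ge (bs : List (Option Int)) (i : Int) : i ≤ findLeft bs i :=
  findLeftAux_ge bs _ i

theorem findLeftAux_le_len (bs : List (Option Int)) :
    ∀ (n : Nat) (i : Int), i ≤ (bs.length : Int) → findLeftAux bs n i ≤ (bs.length : Int) := by
  intro n
  induction n with
  | zero => intro i h; simpa [findLeftAux] using h
  | succ n ih =>
    intro i h
    rw [findLeftAux]
    split
    · rename_i hc
      exact ih (i + 1) (by omega)
    · exact h

theorem findLeft_le_len (bs : List (Option Int)) (i : Int) (h : i ≤ (bs.length : Int)) :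
    findLeft bs i ≤ (bs.length : Int) :=
  findLeftAux_le_len bs _ i h

theorem findLeftAux_some (bs : List (Option Int)) :
    ∀ (n : Nat) (i : Int) (j : Nat) (hj : j < bs.length),
      i ≤ (j : Int) → (j : Int) < findLeftAux bs n i → bs[j] ≠ none := by
  intro n
  induction n with
  | zero => intro i j hj h1 h2; simp [findLeftAux] at h2; omega
  | succ n ih =>
    intro i j hj h1 h2
    rw [findLeftAux] at h2
    split at h2
    · rename_i h
      by_cases hji : i + 1 ≤ (j : Int)
      · exact ih (i + 1) j hj hji h2
      · have hji' : (j : Int) = i := by omega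
        have hg := h.2
        rw [← hji', PySem.List.pyGet?_natCast] at hg
        simpa [List.getElem?_eq_getElem hj] using hg
    · omega

theorem findLeft_some (bs : List (Option Int)) (i : Int) :
    ∀ (j : Nat) (hj : j < bs.length), i ≤ (j : Int) → (j : Int) < findLeft bs i → bs[j] ≠ none :=
  findLeftAux_some bs _ i

theorem findLeftAux_stop (bs : List (Option Int)) :
    ∀ (n : Nat) (i : Int), ((bs.length : Int) - i).toNat ≤ n →
      findLeftAux bs n i < (bs.length : Int) →
      PySem.List.pyGet? bs (findLeftAux bs n i) = some none := by
  intro n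
  induction n with
  | zero => intro i hn h; simp [findLeftAux] at h ⊢; omega
  | succ n ih =>
    intro i hn h
    rw [findLeftAux] at h ⊢
    split at h
    · rename_i hc
      rw [if_pos hc] at ⊢
      exact ih (i + 1) (by omega) h
    · rename_i hc
      rw [if_neg hc] at ⊢
      by_contra hg
      exact hc ⟨h, hg⟩

theorem findLeft_stop (bs : List (Option Int)) (i : Int) (h : findLeft bs i < (bs.length : Int)) :
    PySem.List.pyGet? bs (findLeft bs i) = some none :=
  findLeftAux_stop bs _ i (le_refl _) h

theorem list_decomp (bs : List (Option Int)) (a b : Nat) (hab : a < b) (hb : b < bs.length) :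
    bs = bs.take a ++ bs[a]'(by omega) :: ((bs.drop (a+1)).take (b - a - 1)) ++ bs[b] :: bs.drop (b+1) := by
  have h1 : bs.drop (a+1) = (bs.drop (a+1)).take (b - a - 1) ++ bs[b] :: bs.drop (b+1) := by
    conv_lhs => rw [← List.take_append_drop (b - a - 1) (bs.drop (a+1))]
    congr 1
    rw [List.drop_drop]
    have hba : a + 1 + (b - a - 1) = b := by omega
    rw [hba, List.drop_eq_getElem_cons hb]
  conv_lhs => rw [← List.take_append_drop a bs,
    List.drop_eq_getElem_cons (show a < bs.length by omega), h1]
  simp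

theorem set_at_len {α : Type} (l₁ l₂ : List α) (x y : α) :
    (l₁ ++ x :: l₂).set l₁.length y = l₁ ++ y :: l₂ := by
  induction l₁ with
  | nil => rfl
  | cons a l₁ ih => simp [ih]

theorem set_at_len' {α : Type} (l₁ l₂ : List α) (x y : α) (n : Nat) (h : n = l₁.length) :
    (l₁ ++ x :: l₂).set n y = l₁ ++ y :: l₂ := by
  subst h; exact set_at_len l₁ l₂ x y

theorem set_mid {α : Type} (P M T : List α) (x y : α) (n : Nat) (h : n = P.length) :
    ((P ++ x :: M) ++ T).set n y = (P ++ y :: M) ++ T := by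
  subst h
  induction P with
  | nil => rfl
  | cons a P ih => simp

theorem all_none_spec (bs : List (Option Int))
    (h : ∀ (j : Nat) (hj : j < bs.length), bs[j] = none) : altSpec bs = bs := by
  have := spec_sorted [] bs (by simp) (fun y hy => by
    obtain ⟨j, hj, rfl⟩ := List.mem_iff_getElem.mp hy
    exact h j hj)
  simpa using this

theorem sorted_spec (bs : List (Option Int)) (t : Nat)
    (hsome : ∀ (j : Nat) (hj : j < bs.length), j < t → bs[j] ≠ none)
    (hnone : ∀ (j : Nat) (hj : j < bs.length), t ≤ j → bs[j] = none) : altSpec bs = bs := by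
  have hdecomp := List.take_append_drop t bs
  have hP : ∀ y ∈ bs.take t, y.isSome = true := by
    intro y hy
    obtain ⟨j, hj, rfl⟩ := List.mem_iff_getElem.mp hy
    have hj' : j < bs.length := by
      have := hj; simp [List.length_take] at this; omega
    rw [List.getElem_take]
    exact Option.isSome_iff_ne_none.mpr
      (hsome j hj' (by have := hj; simp [List.length_take] at this; omega))
  have hS : ∀ y ∈ bs.drop t, y = none := by
    intro y hy
    obtain ⟨j, hj, rfl⟩ := List.mem_iff_getElem.mp hy
    rw [List.getElem_drop]
    exact hnone (t + j) (by have := hj; simp [List.length_drop] at this; omega) (by omega)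
  calc altSpec bs = altSpec (bs.take t ++ bs.drop t) := by rw [hdecomp]
    _ = bs.take t ++ bs.drop t := spec_sorted _ _ hP hS
    _ = bs := hdecomp

theorem goA_eq (N : Nat) : ∀ (rf : Int) (bs : List (Option Int)), (rf + 1).toNat ≤ N →
    rf < (bs.length : Int) → (∀ (j : Nat) (hj : j < bs.length), rf < (j : Int) → bs[j] = none) →
    goA N bs rf = altSpec bs := by
  induction N with
  | zero =>
    intro rf bs hN hlen hinv
    rw [goA]
    exact (all_none_spec bs (fun j hj => hinv j hj (by omega))).symm
  | succ N ih =>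
    intro rf bs hN hlen hinv
    rw [goA]
    by_cases hr0 : findRight bs rf < 0
    · simp only [hr0, if_pos]
      refine (all_none_spec bs ?_).symm
      intro j hj
      by_cases hji : (j : Int) ≤ rf
      · exact findRight_none bs rf j hj (by omega) hji
      · exact hinv j hj (by omega)
    · simp only [hr0, if_false]
      set r := findRight bs rf with hrdef
      set l := findLeft bs 0 with hldef
      have hr_le : r ≤ rf := findRight_le bs rf
      have hr0' : 0 ≤ r := by omega
      have hrlen : r < (bs.length : Int) := by omega
      have hrnat : r.toNat < bs.length := by omega
      have hrstop : ¬ PySem.List.pyGet? bs r = some none := by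
        rw [hrdef]; exact findRight_stop bs rf hr0'
      have hrget : PySem.List.pyGet? bs r = some (bs[r.toNat]'hrnat) :=
        PySem.List.pyGet?_eq_some_getElem bs hr0' hrlen
      have hrsome : bs[r.toNat]'hrnat ≠ none := by
        intro hc; exact hrstop (by rw [hrget, hc])
      have hl0 : (0 : Int) ≤ l := findLeft_ge bs 0
      have hllen : l ≤ (bs.length : Int) := findLeft_le_len bs 0 (by omega)
      by_cases hlr : l ≥ r
      · simp only [hlr, if_pos]
        have hlr' : r < l := by
          rcases eq_or_lt_of_le hlr with heq | hlt
          · exfalso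
            have hlstop : PySem.List.pyGet? bs l = some none := by
              rw [hldef]
              exact findLeft_stop bs 0 (by rw [← hldef]; omega)
            rw [← heq] at hlstop
            exact hrstop hlstop
          · exact hlt
        refine (sorted_spec bs l.toNat ?_ ?_).symm
        · intro j hj hjt
          exact findLeft_some bs 0 j hj (by omega) (by omega)
        · intro j hj hjt
          by_cases hji : (j : Int) ≤ rf
          · exact findRight_none bs rf j hj (by omega) hji
          · exact hinv j hj (by omega)
      · simp only [hlr, if_false]
        have hlr' : l < r := by omega
        have hlnat : l.toNat < bs.length := by omega
        have hlstop : PySem.List.pyGet? bs l = some none := by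
          rw [hldef]
          exact findLeft_stop bs 0 (by rw [← hldef]; omega)
        have hlget : PySem.List.pyGet? bs l = some (bs[l.toNat]'hlnat) :=
          PySem.List.pyGet?_eq_some_getElem bs hl0 (by omega)
        have hlnone : bs[l.toNat]'hlnat = none := by
          rw [hlget] at hlstop
          exact Option.some_injective _ hlstop
        obtain ⟨v, hv⟩ := Option.ne_none_iff_exists'.mp hrsome
        have hval : (PySem.List.pyGet? bs r).getD none = some v := by rw [hrget, hv]; rfl
        have hdec := list_decomp bs l.toNat r.toNat (by omega) hrnat
        have hPlen : (bs.take l.toNat).length = l.toNat := by simp; omega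
        have hMlen : ((bs.drop (l.toNat+1)).take (r.toNat - l.toNat - 1)).length
            = r.toNat - l.toNat - 1 := by simp; omega
        have hdec' : bs = bs.take l.toNat ++ none
            :: ((bs.drop (l.toNat+1)).take (r.toNat - l.toNat - 1)) ++ some v
            :: bs.drop (r.toNat+1) := by
          conv_lhs => rw [hdec]
          simp only [hlnone, hv]
        have hset : (bs.set l.toNat (some v)).set r.toNat none
            = bs.take l.toNat ++ some v
              :: ((bs.drop (l.toNat+1)).take (r.toNat - l.toNat - 1)) ++ none
              :: bs.drop (r.toNat+1) := by
          conv_lhs => rw [hdec']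
          rw [set_mid (bs.take l.toNat) _ _ none (some v) _ hPlen.symm,
            set_at_len' _ _ (some v) none _ (by simp [hPlen, hMlen]; omega)]
        have hP : ∀ y ∈ bs.take l.toNat, y.isSome = true := by
          intro y hy
          obtain ⟨j, hj, rfl⟩ := List.mem_iff_getElem.mp hy
          have hj' : j < bs.length := by rw [hPlen] at hj; omega
          rw [List.getElem_take]
          exact Option.isSome_iff_ne_none.mpr
            (findLeft_some bs 0 j hj' (by omega) (by rw [hPlen] at hj; omega))
        have hS : ∀ y ∈ bs.drop (r.toNat+1), y = none := by
          intro y hy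
          obtain ⟨j, hj, rfl⟩ := List.mem_iff_getElem.mp hy
          have hj' : r.toNat + 1 + j < bs.length := by
            have := hj; simp [List.length_drop] at this; omega
          rw [List.getElem_drop]
          by_cases hji : ((r.toNat + 1 + j : Nat) : Int) ≤ rf
          · exact findRight_none bs rf _ hj' (by omega) hji
          · exact hinv _ hj' (by omega)
        rw [hval]
        have hinv' : ∀ (j : Nat) (hj : j < ((bs.set l.toNat (some v)).set r.toNat none).length),
            r - 1 < (j : Int) → ((bs.set l.toNat (some v)).set r.toNat none)[j] = none := by
          intro j hj hgt
          have hjlen : j < bs.length := by simpa using hj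
          simp only [List.getElem_set]
          split_ifs with h1 h2
          · rfl
          · omega
          · by_cases hji : (j : Int) ≤ rf
            · exact findRight_none bs rf j hjlen (by omega) hji
            · exact hinv j hjlen (by omega)
        rw [ih (r - 1) ((bs.set l.toNat (some v)).set r.toNat none) (by omega)
          (by simp; omega) hinv']
        rw [hset]
        conv_rhs => rw [hdec']
        exact spec_move _ _ _ v hP hS

-- ===== VERDICT (by name: the statement is the Claim_ definition above) =====
theorem move_things_left_spec : Claim_equal_move_things_left := by
  intro bs _
  unfold Spec_move_things_left
  rw [alt_eq_spec, move_things_left]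
  exact goA_eq bs.length ((bs.length : Int) - 1) bs (by omega) (by omega)
    (fun j hj hgt => absurd hgt (by omega))
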